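-- pv_equiv track=rewrite | github.com/icheishvili/pyoauth | pyoauth.py | lex_header_token
-- ===== SOURCE A (Python) =====
-- HEADER_SEPARATORS = (
--     '(', ')', '<', '>', '@', ',', ';', ':', '\\', '"', '/', '[', ']',
--     '?', '=', '{', '}', ' ', '\t',
-- )
--
-- def lex_header_token(value, pos):
--     if value[pos] in HEADER_SEPARATORS:
--         return None
--     parts = []
--     for i in range(pos, len(value)):
--         if value[i] in HEADER_SEPARATORS:
--             return i, 'T_TOKEN', ''.join(parts)
--         parts.append(value[i])
--     return len(value), 'T_TOKEN', ''.join(parts)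
-- ===== SOURCE B (Python) =====
-- import re
--
-- HEADER_SEPARATORS = (
--     '(', ')', '<', '>', '@', ',', ';', ':', '\\', '"', '/', '[', ']',
--     '?', '=', '{', '}', ' ', '\t',
-- )
--
-- # Maximal run of non-separator characters (the 19 HEADER_SEPARATORS escaped).
-- _TOKEN_RE = re.compile(r'[^()<>@,;:\\"/\[\]?={} \t]*')
--
-- def lex_header_token(value, pos):
--     if value[pos] in HEADER_SEPARATORS:
--         return None
--     if pos < 0:  # normalize a negative Python index to the position it names
--         pos += len(value)
--     m = _TOKEN_RE.match(value, pos)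
--     return m.end(), 'T_TOKEN', m.group()
-- ===== Notes on version B (the rewrite author's own statement) =====
-- stated objective: faster
-- what changed: A's explicit per-character loop that appends to a parts list and checks each character against the separator tuple is replaced by a single precompiled-regex match of the maximal non-separator run at the offset (m.end() gives the token end, m.group() the token), after normalizing a negative index by pos += len(value).
-- intended difference: On in-range negative pos whose character is not a separator, A's loop range(pos, len) re-scans the string with negative-index wraparound and returns garbage (the tail followed by the whole string again, possibly with a negative end index), while B normalizes pos += len and returns the token that actually starts at that character, which is the intended lexing. — e.g. on lex_header_token("ab", -1): A returns some (2, "T_TOKEN", "bab"), B returns some (2, "T_TOKEN", "b")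
import Mathlib
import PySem

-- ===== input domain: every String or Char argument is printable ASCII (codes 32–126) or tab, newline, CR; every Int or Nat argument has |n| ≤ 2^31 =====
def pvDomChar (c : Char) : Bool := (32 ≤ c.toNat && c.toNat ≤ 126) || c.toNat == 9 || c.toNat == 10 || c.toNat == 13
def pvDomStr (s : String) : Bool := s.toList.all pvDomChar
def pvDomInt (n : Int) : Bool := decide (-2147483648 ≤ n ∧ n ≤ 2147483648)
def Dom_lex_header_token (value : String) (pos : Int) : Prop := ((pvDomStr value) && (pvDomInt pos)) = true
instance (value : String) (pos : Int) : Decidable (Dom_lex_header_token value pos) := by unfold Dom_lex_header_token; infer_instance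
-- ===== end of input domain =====

-- B replaces A's per-character accumulation loop by a maximal-run match (regex in Python,
-- takeWhile in the port) plus arithmetic on its end offset; a timing run measures speed.

-- ===== PORT A =====
def hdrSeps : List Char :=
  ['(', ')', '<', '>', '@', ',', ';', ':', '\\', '"', '/', '[', ']',
   '?', '=', '{', '}', ' ', '\t']

-- the 'for i in range(pos, len(value))' loop of A, with 'parts' as accumulator
def lexGoA (value : List Char) : List Int → List Char → Int × String × String
  | [], parts => ((value.length : Int), "T_TOKEN", String.ofList parts)
  | i :: rest, parts =>
    match PySem.List.pyGet? value i with
    | some c =>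
      if c ∈ hdrSeps then (i, "T_TOKEN", String.ofList parts)
      else lexGoA value rest (parts ++ [c])
    | none => (i, "T_TOKEN", String.ofList parts)  -- unreachable: every i of the range is in bounds under Pre_

def lex_header_token (value : String) (pos : Int) : Option (Int × String × String) :=
  match PySem.Str.pyGet? value pos with
  | none => none  -- IndexError: excluded by Pre_
  | some c =>
    if c ∈ hdrSeps then none
    else some (lexGoA value.toList (PySem.List.pyRange pos value.toList.length 1) [])

-- ===== PORT B =====
-- B's regex `[^()<>@,;:\\"/\[\]?={} \t]*` matched at offset pos is exactly the maximal
-- run of non-separator characters there; B first normalizes a negative index (pos += len).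
def lex_header_token_alt (value : String) (pos : Int) : Option (Int × String × String) :=
  match PySem.Str.pyGet? value pos with
  | none => none  -- IndexError: excluded by Pre_
  | some c =>
    if c ∈ hdrSeps then none
    else
      let start : Int := if pos < 0 then pos + value.toList.length else pos
      let tok := (value.toList.drop start.toNat).takeWhile (fun c => c ∉ hdrSeps)
      some (start + tok.length, "T_TOKEN", String.ofList tok)

-- ===== PRECONDITION & SPEC =====
-- Pre_ excludes exactly the out-of-range pos (pos < -len or pos ≥ len) on which A raises IndexError.
def Pre_lex_header_token (value : String) (pos : Int) : Prop :=
  -(value.toList.length : Int) ≤ pos ∧ pos < value.toList.length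
instance (value : String) (pos : Int) : Decidable (Pre_lex_header_token value pos) := by
  unfold Pre_lex_header_token; infer_instance

def pvWitness_lex_header_token : String × Int := ("abc def", 0)

-- On in-range negative pos whose character is not a separator, A's loop re-scans indices
-- pos..len-1 with negative-index wraparound and returns garbage (the tail followed by the
-- whole string again, possibly with a negative end index), while B returns the token that
-- actually starts at that character (it normalizes pos += len first) — the intended lexing.
def D_lex_header_token (value : String) (pos : Int) : Prop :=
  pos < 0 ∧ (PySem.Str.pyGet? value pos).any (fun c => c ∉ hdrSeps) = true
instance (value : String) (pos : Int) : Decidable (D_lex_header_token value pos) := by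
  unfold D_lex_header_token; infer_instance

def Spec_lex_header_token (value : String) (pos : Int) (out : Option (Int × String × String)) : Prop :=
  ¬ D_lex_header_token value pos → out = lex_header_token_alt value pos
instance (value : String) (pos : Int) (out : Option (Int × String × String)) : Decidable (Spec_lex_header_token value pos out) := by
  unfold Spec_lex_header_token; infer_instance

def pvDiffWitness_lex_header_token : String × Int := ("ab", -1)
def pvDiffWitnessOut_lex_header_token : (Option (Int × String × String)) × (Option (Int × String × String)) :=
  (some (2, "T_TOKEN", "bab"), some (2, "T_TOKEN", "b"))

-- ===== CLAIM (what is proved, stated in full; the proofs are below) =====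
def Claim_unchanged_lex_header_token : Prop := ∀ (value : String) (pos : Int), Dom_lex_header_token value pos → Pre_lex_header_token value pos → Spec_lex_header_token value pos (lex_header_token value pos)
def Claim_changed_lex_header_token : Prop := Dom_lex_header_token (pvDiffWitness_lex_header_token.1) (pvDiffWitness_lex_header_token.2) ∧ Pre_lex_header_token (pvDiffWitness_lex_header_token.1) (pvDiffWitness_lex_header_token.2) ∧ D_lex_header_token (pvDiffWitness_lex_header_token.1) (pvDiffWitness_lex_header_token.2) ∧ lex_header_token (pvDiffWitness_lex_header_token.1) (pvDiffWitness_lex_header_token.2) = pvDiffWitnessOut_lex_header_token.1 ∧ lex_header_token_alt (pvDiffWitness_lex_header_token.1) (pvDiffWitness_lex_header_token.2) = pvDiffWitnessOut_lex_header_token.2 ∧ pvDiffWitnessOut_lex_header_token.1 ≠ pvDiffWitnessOut_lex_header_token.2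

-- ===== LEMMAS AND PROOFS =====

-- A's loop from a non-negative position p computes the maximal non-separator run after p
lemma lexGoA_eq (value : List Char) (p : Nat) (acc : List Char) (hp : p ≤ value.length) :
    lexGoA value (PySem.List.pyRange (p : Int) (value.length : Int) 1) acc =
      (((p : Int) + ((value.drop p).takeWhile (fun c => c ∉ hdrSeps)).length), "T_TOKEN",
        String.ofList (acc ++ (value.drop p).takeWhile (fun c => c ∉ hdrSeps))) := by
  induction hn : value.length - p generalizing p acc with
  | zero =>
    have hr : PySem.List.pyRange (p : Int) (value.length : Int) 1 = [] := by
      simp [PySem.List.pyRange_one, show (((value.length : Int)) - p).toNat = 0 by omega]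
    rw [hr]
    simp [lexGoA, List.drop_eq_nil_iff.mpr (by omega : value.length ≤ p)]
    omega
  | succ n ih =>
    have hlt : p < value.length := by omega
    have hcast : (p : Int) < (value.length : Int) := by exact_mod_cast hlt
    rw [PySem.List.pyRange_one_cons hcast]
    have hdrop : value.drop p = value[p] :: value.drop (p + 1) := List.drop_eq_getElem_cons hlt
    simp only [lexGoA, PySem.List.pyGet?_ofNat value p hlt]
    by_cases hs : value[p] ∈ hdrSeps
    · simp only [hs, if_pos, hdrop, List.takeWhile_cons]
      simp
    · have h1 : (p : Int) + 1 = ((p + 1 : Nat) : Int) := by push_cast; ring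
      rw [if_neg hs, h1, ih (p + 1) (acc ++ [value[p]]) (by omega) (by omega)]
      rw [hdrop]
      simp only [List.takeWhile_cons]
      have : (decide (value[p] ∉ hdrSeps)) = true := by simp [hs]
      simp only [this, if_pos, List.length_cons, List.append_assoc, List.cons_append,
        List.nil_append, Prod.mk.injEq]
      refine ⟨by push_cast; ring, trivial⟩

theorem lex_header_token_spec : Claim_unchanged_lex_header_token := by
  intro value pos hdom hpre hnd
  obtain ⟨h1, h2⟩ := hpre
  have hin : PySem.Raise.InRange value.toList.length pos := by
    constructor <;> omega
  have hsome : ∃ c, PySem.Str.pyGet? value pos = some c := by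
    rcases h : PySem.Str.pyGet? value pos with _ | c
    · exfalso
      rw [PySem.Str.pyGet?, PySem.Chars.pyGet?_eq_listPyGet?,
          PySem.List.pyGet?_eq_none_iff] at h
      exact h hin
    · exact ⟨c, rfl⟩
  obtain ⟨c, hc⟩ := hsome
  by_cases hneg : pos < 0
  · -- negative pos: ¬D forces c to be a separator, so both sides are none
    have hsep : c ∈ hdrSeps := by
      by_contra hcs
      exact hnd ⟨hneg, by rw [hc]; simpa using hcs⟩
    unfold lex_header_token lex_header_token_alt
    rw [hc]
    simp [hsep]
  · -- 0 ≤ pos: both lex the maximal non-separator run from pos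
    unfold lex_header_token lex_header_token_alt
    rw [hc]
    by_cases hsep : c ∈ hdrSeps
    · simp [hsep]
    · simp only [hsep, if_false]
      have hstart : (if pos < 0 then pos + (value.toList.length : Int) else pos) = pos := by
        simp [hneg]
      have hple : pos.toNat ≤ value.toList.length := by omega
      have hposc : ((pos.toNat : Nat) : Int) = pos := by omega
      rw [hstart]
      rw [show PySem.List.pyRange pos (value.toList.length : Int) 1
            = PySem.List.pyRange ((pos.toNat : Nat) : Int) (value.toList.length : Int) 1 by rw [hposc]]
      rw [lexGoA_eq value.toList pos.toNat [] hple]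
      simp [hposc]

theorem lex_header_token_changed : Claim_changed_lex_header_token := by
  unfold Claim_changed_lex_header_token; decide
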